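-- pv_equiv track=rewrite | github.com/shubhamsingh-cell/media-plan-generator | slo_config.py | classify_endpoint_to_module
-- ===== SOURCE A (Python) =====
-- ROUTE_MODULE_MAP: dict[str, str] = {
--     "/api/copilot": "plan_copilot",
--     "/api/morning-brief": "morning_brief",
--     "/api/chat": "nova_ai",
--     "/api/nova": "nova_ai",
--     "/api/market-pulse": "market_pulse",
--     "/api/signals": "market_signals",
--     "/api/features/store": "feature_store",
--     "/api/outcome": "outcome_engine",
--     "/api/pipeline": "outcome_pipeline",
--     "/api/predict": "prediction_model",
--     "/api/benchmarks": "benchmarking",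
--     "/api/attribution": "attribution_dashboard",
--     "/api/scorecard": "scorecard_generator",
--     "/api/canvas": "canvas_engine",
--     "/api/taxonomy": "role_taxonomy",
--     "/api/templates": "plan_templates",
--     "/api/plan-events": "plan_events",
--     "/api/events": "event_store",
--     "/api/ats": "ats_widget",
--     "/api/edge": "edge_router",
--     "/api/routing": "edge_routing",
--     "/api/rate-limits": "rate_limiter_adaptive",
--     "/api/coalesce": "request_coalescing",
--     "/api/circuit": "circuit_breaker_mesh",
--     "/api/generate": "command_center",
--     "/api/quick-plan": "command_center",
--     "/api/research": "intelligence_hub",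
--     "/api/competitive": "intelligence_hub",
--     "/api/enrich": "intelligence_hub",
-- }
--
-- def classify_endpoint_to_module(endpoint: str) -> str:
--     """Map a request path to its owning module name.
--
--     Uses longest-prefix matching against ROUTE_MODULE_MAP.
--
--     Args:
--         endpoint: The URL path (e.g. '/api/chat').
--
--     Returns:
--         Module name string, or empty string if unclassified.
--     """
--     if not endpoint:
--         return ""
--     # Exact match first
--     mod = ROUTE_MODULE_MAP.get(endpoint)
--     if mod:
--         return mod
--     # Prefix match (longest wins)
--     best_match = ""
--     best_len = 0
--     for prefix, mod_name in ROUTE_MODULE_MAP.items():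
--         if endpoint.startswith(prefix) and len(prefix) > best_len:
--             best_match = mod_name
--             best_len = len(prefix)
--     return best_match
-- ===== SOURCE B (Python) =====
-- def classify_endpoint_to_module(endpoint: str) -> str:
--     """Map a request path to its owning module name.
--
--     The route prefixes are mutually prefix-free, so at most one of them can
--     match a given path: a flat decision chain of startswith tests (no table,
--     no best-length tracking) returns the same module as longest-prefix
--     matching, and an exact match is just a successful startswith test.
--     """
--     if not endpoint:
--         return ""
--     if endpoint.startswith("/api/copilot"):
--         return "plan_copilot"
--     if endpoint.startswith("/api/morning-brief"):
--         return "morning_brief"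
--     if endpoint.startswith("/api/chat"):
--         return "nova_ai"
--     if endpoint.startswith("/api/nova"):
--         return "nova_ai"
--     if endpoint.startswith("/api/market-pulse"):
--         return "market_pulse"
--     if endpoint.startswith("/api/signals"):
--         return "market_signals"
--     if endpoint.startswith("/api/features/store"):
--         return "feature_store"
--     if endpoint.startswith("/api/outcome"):
--         return "outcome_engine"
--     if endpoint.startswith("/api/pipeline"):
--         return "outcome_pipeline"
--     if endpoint.startswith("/api/predict"):
--         return "prediction_model"
--     if endpoint.startswith("/api/benchmarks"):
--         return "benchmarking"
--     if endpoint.startswith("/api/attribution"):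
--         return "attribution_dashboard"
--     if endpoint.startswith("/api/scorecard"):
--         return "scorecard_generator"
--     if endpoint.startswith("/api/canvas"):
--         return "canvas_engine"
--     if endpoint.startswith("/api/taxonomy"):
--         return "role_taxonomy"
--     if endpoint.startswith("/api/templates"):
--         return "plan_templates"
--     if endpoint.startswith("/api/plan-events"):
--         return "plan_events"
--     if endpoint.startswith("/api/events"):
--         return "event_store"
--     if endpoint.startswith("/api/ats"):
--         return "ats_widget"
--     if endpoint.startswith("/api/edge"):
--         return "edge_router"
--     if endpoint.startswith("/api/routing"):
--         return "edge_routing"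
--     if endpoint.startswith("/api/rate-limits"):
--         return "rate_limiter_adaptive"
--     if endpoint.startswith("/api/coalesce"):
--         return "request_coalescing"
--     if endpoint.startswith("/api/circuit"):
--         return "circuit_breaker_mesh"
--     if endpoint.startswith("/api/generate"):
--         return "command_center"
--     if endpoint.startswith("/api/quick-plan"):
--         return "command_center"
--     if endpoint.startswith("/api/research"):
--         return "intelligence_hub"
--     if endpoint.startswith("/api/competitive"):
--         return "intelligence_hub"
--     if endpoint.startswith("/api/enrich"):
--         return "intelligence_hub"
--     return ""
-- ===== Notes on version B (the rewrite author's own statement) =====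
-- stated objective: alternative
-- what changed: Replaced the dict exact-match lookup plus full-scan best_len/best_match tracking with a flat decision chain of startswith tests, correct because the route prefixes are mutually prefix-free so at most one test can fire.
import Mathlib
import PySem

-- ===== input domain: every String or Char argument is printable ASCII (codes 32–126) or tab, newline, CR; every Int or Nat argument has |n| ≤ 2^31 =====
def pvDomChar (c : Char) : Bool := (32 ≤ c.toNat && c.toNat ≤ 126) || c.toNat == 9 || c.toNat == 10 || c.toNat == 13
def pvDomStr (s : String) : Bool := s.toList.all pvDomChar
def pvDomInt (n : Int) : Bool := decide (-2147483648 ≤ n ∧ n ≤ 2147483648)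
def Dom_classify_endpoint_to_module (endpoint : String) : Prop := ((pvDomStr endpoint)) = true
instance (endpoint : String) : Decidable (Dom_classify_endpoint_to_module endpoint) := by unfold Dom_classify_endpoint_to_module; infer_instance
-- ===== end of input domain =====

-- B replaces A's dict lookup plus full-scan best_len/best_match tracking by a flat decision
-- chain of startswith tests: the route prefixes are mutually prefix-free, so at most one test
-- can fire and the chain returns the same module as longest-prefix matching (alternative).

-- ===== PORT A =====
def routeList : List (String × String) :=
  [ ("/api/copilot", "plan_copilot"), ("/api/morning-brief", "morning_brief"),
    ("/api/chat", "nova_ai"), ("/api/nova", "nova_ai"),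
    ("/api/market-pulse", "market_pulse"), ("/api/signals", "market_signals"),
    ("/api/features/store", "feature_store"), ("/api/outcome", "outcome_engine"),
    ("/api/pipeline", "outcome_pipeline"), ("/api/predict", "prediction_model"),
    ("/api/benchmarks", "benchmarking"), ("/api/attribution", "attribution_dashboard"),
    ("/api/scorecard", "scorecard_generator"), ("/api/canvas", "canvas_engine"),
    ("/api/taxonomy", "role_taxonomy"), ("/api/templates", "plan_templates"),
    ("/api/plan-events", "plan_events"), ("/api/events", "event_store"),
    ("/api/ats", "ats_widget"), ("/api/edge", "edge_router"),
    ("/api/routing", "edge_routing"), ("/api/rate-limits", "rate_limiter_adaptive"),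
    ("/api/coalesce", "request_coalescing"), ("/api/circuit", "circuit_breaker_mesh"),
    ("/api/generate", "command_center"), ("/api/quick-plan", "command_center"),
    ("/api/research", "intelligence_hub"), ("/api/competitive", "intelligence_hub"),
    ("/api/enrich", "intelligence_hub") ]

def routeModuleMap : PySem.Dict String String := PySem.Dict.mk routeList

-- the `for prefix, mod_name in ROUTE_MODULE_MAP.items():` loop with state (best_match, best_len)
def classifyScan (endpoint : String) : String × Int :=
  routeModuleMap.items.foldl
    (fun (st : String × Int) pm =>
      if PySem.Str.startswith endpoint pm.1 && decide (st.2 < PySem.Str.len pm.1)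
      then (pm.2, PySem.Str.len pm.1) else st)
    ("", 0)

def classify_endpoint_to_module (endpoint : String) : String :=
  if endpoint == "" then ""
  else
    match PySem.Dict.get? routeModuleMap endpoint with
    | some mod => if mod == "" then (classifyScan endpoint).1 else mod  -- `if mod:` truthy test
    | none => (classifyScan endpoint).1

-- ===== PORT B =====
def classify_endpoint_to_module_alt (endpoint : String) : String :=
  if endpoint == "" then ""
  else if PySem.Str.startswith endpoint "/api/copilot" then "plan_copilot"
  else if PySem.Str.startswith endpoint "/api/morning-brief" then "morning_brief"
  else if PySem.Str.startswith endpoint "/api/chat" then "nova_ai"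
  else if PySem.Str.startswith endpoint "/api/nova" then "nova_ai"
  else if PySem.Str.startswith endpoint "/api/market-pulse" then "market_pulse"
  else if PySem.Str.startswith endpoint "/api/signals" then "market_signals"
  else if PySem.Str.startswith endpoint "/api/features/store" then "feature_store"
  else if PySem.Str.startswith endpoint "/api/outcome" then "outcome_engine"
  else if PySem.Str.startswith endpoint "/api/pipeline" then "outcome_pipeline"
  else if PySem.Str.startswith endpoint "/api/predict" then "prediction_model"
  else if PySem.Str.startswith endpoint "/api/benchmarks" then "benchmarking"
  else if PySem.Str.startswith endpoint "/api/attribution" then "attribution_dashboard"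
  else if PySem.Str.startswith endpoint "/api/scorecard" then "scorecard_generator"
  else if PySem.Str.startswith endpoint "/api/canvas" then "canvas_engine"
  else if PySem.Str.startswith endpoint "/api/taxonomy" then "role_taxonomy"
  else if PySem.Str.startswith endpoint "/api/templates" then "plan_templates"
  else if PySem.Str.startswith endpoint "/api/plan-events" then "plan_events"
  else if PySem.Str.startswith endpoint "/api/events" then "event_store"
  else if PySem.Str.startswith endpoint "/api/ats" then "ats_widget"
  else if PySem.Str.startswith endpoint "/api/edge" then "edge_router"
  else if PySem.Str.startswith endpoint "/api/routing" then "edge_routing"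
  else if PySem.Str.startswith endpoint "/api/rate-limits" then "rate_limiter_adaptive"
  else if PySem.Str.startswith endpoint "/api/coalesce" then "request_coalescing"
  else if PySem.Str.startswith endpoint "/api/circuit" then "circuit_breaker_mesh"
  else if PySem.Str.startswith endpoint "/api/generate" then "command_center"
  else if PySem.Str.startswith endpoint "/api/quick-plan" then "command_center"
  else if PySem.Str.startswith endpoint "/api/research" then "intelligence_hub"
  else if PySem.Str.startswith endpoint "/api/competitive" then "intelligence_hub"
  else if PySem.Str.startswith endpoint "/api/enrich" then "intelligence_hub"
  else ""

-- ===== PRECONDITION & SPEC =====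
def Spec_classify_endpoint_to_module (endpoint : String) (out : String) : Prop := out = classify_endpoint_to_module_alt endpoint
instance (endpoint : String) (out : String) : Decidable (Spec_classify_endpoint_to_module endpoint out) := by unfold Spec_classify_endpoint_to_module; infer_instance

-- ===== CLAIM (what is proved, stated in full; the proofs are below) =====
def Claim_equal_classify_endpoint_to_module : Prop := ∀ (endpoint : String), Dom_classify_endpoint_to_module endpoint → Spec_classify_endpoint_to_module endpoint (classify_endpoint_to_module endpoint)

-- ===== LEMMAS AND PROOFS =====

-- No route prefix starts with another (distinct) route prefix: checked on the literal table.
lemma routes_no_prefix :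
    routeModuleMap.items.Pairwise
      (fun a b => PySem.Str.startswith b.1 a.1 = false ∧ PySem.Str.startswith a.1 b.1 = false) := by
  decide

lemma routes_vals_ne_empty : ∀ pm ∈ routeModuleMap.items, (pm.2 == "") = false := by decide

lemma routes_keys_pos : ∀ pm ∈ routeModuleMap.items, (0:Int) < PySem.Str.len pm.1 := by decide

-- At most one route prefix can be a prefix of a given endpoint.
lemma routes_excl (endpoint : String) :
    routeModuleMap.items.Pairwise
      (fun a b => ¬(PySem.Str.startswith endpoint a.1 = true ∧ PySem.Str.startswith endpoint b.1 = true)) := by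
  refine routes_no_prefix.imp ?_
  rintro a b ⟨hba, hab⟩ ⟨ha, hb⟩
  rw [PySem.Str.startswith_eq, PySem.Chars.startswith_iff] at ha hb
  rw [PySem.Str.startswith_eq] at hab hba
  rcases List.prefix_or_prefix_of_prefix ha hb with h | h
  · rw [(PySem.Chars.startswith_iff _ _).mpr h] at hba
    exact Bool.noConfusion hba
  · rw [(PySem.Chars.startswith_iff _ _).mpr h] at hab
    exact Bool.noConfusion hab

-- the scan step, abbreviated
def scanStep (endpoint : String) (st : String × Int) (pm : String × String) : String × Int :=
  if PySem.Str.startswith endpoint pm.1 && decide (st.2 < PySem.Str.len pm.1)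
  then (pm.2, PySem.Str.len pm.1) else st

-- first-match-or-default, the characterisation both ports are reduced to
def findD (endpoint : String) (l : List (String × String)) : String :=
  match l.find? (fun pm => PySem.Str.startswith endpoint pm.1) with
  | some pm => pm.2
  | none => ""

lemma findD_nil (endpoint : String) : findD endpoint [] = "" := rfl

lemma findD_cons (endpoint : String) (a : String × String) (t : List (String × String)) :
    findD endpoint (a :: t) =
      if PySem.Str.startswith endpoint a.1 then a.2 else findD endpoint t := by
  simp only [findD, List.find?_cons, PySem.Str.startswith_eq]
  cases h : PySem.Chars.startswith endpoint.toList a.1.toList <;> simp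

lemma fold_no_match (endpoint : String) (l : List (String × String)) (st : String × Int)
    (h : ∀ x ∈ l, PySem.Str.startswith endpoint x.1 = false) :
    l.foldl (scanStep endpoint) st = st := by
  induction l generalizing st with
  | nil => rfl
  | cons a t ih =>
    have ha : PySem.Chars.startswith endpoint.toList a.1.toList = false := by
      simpa using h a (by simp)
    rw [List.foldl_cons, show scanStep endpoint st a = st by simp [scanStep, ha]]
    exact ih st (fun x hx => h x (List.mem_cons_of_mem a hx))

lemma fold_eq_findD (endpoint : String) (l : List (String × String))
    (hexcl : l.Pairwise (fun a b => ¬(PySem.Str.startswith endpoint a.1 = true ∧ PySem.Str.startswith endpoint b.1 = true)))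
    (hpos : ∀ pm ∈ l, (0:Int) < PySem.Str.len pm.1) :
    (l.foldl (scanStep endpoint) ("", 0)).1 = findD endpoint l := by
  induction l with
  | nil => rfl
  | cons a t ih =>
    rcases List.pairwise_cons.mp hexcl with ⟨hhead, htail⟩
    rw [findD_cons]
    cases ha : PySem.Str.startswith endpoint a.1 with
    | true =>
      have htf : ∀ x ∈ t, PySem.Str.startswith endpoint x.1 = false := by
        intro x hx
        cases hsx : PySem.Str.startswith endpoint x.1 with
        | false => rfl
        | true => exact absurd ⟨ha, hsx⟩ (hhead x hx)
      have hps := hpos a (by simp)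
      have hstep : scanStep endpoint ("", 0) a = (a.2, PySem.Str.len a.1) := by
        have hd : decide (((("", (0:Int)) : String × Int).2) < PySem.Str.len a.1) = true :=
          decide_eq_true hps
        simp only [scanStep, ha, hd, Bool.and_self, if_pos]
      rw [List.foldl_cons, hstep, fold_no_match endpoint t _ htf, if_pos rfl]
    | false =>
      have ha' : PySem.Chars.startswith endpoint.toList a.1.toList = false := by simpa using ha
      have hstep : scanStep endpoint ("", 0) a = ("", 0) := by
        simp [scanStep, ha']
      rw [List.foldl_cons, hstep, if_neg (by simp)]
      exact ih htail (fun pm hpm => hpos pm (List.mem_cons_of_mem a hpm))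

-- two matching items are equal
lemma match_unique {α : Type} (p : α → Bool) (l : List α)
    (hexcl : l.Pairwise (fun a b => ¬(p a = true ∧ p b = true)))
    {a b : α} (hal : a ∈ l) (hbl : b ∈ l) (hpa : p a = true) (hpb : p b = true) : a = b := by
  by_contra hne
  exact hexcl.forall (fun x y h hxy => h ⟨hxy.2, hxy.1⟩) hal hbl hne ⟨hpa, hpb⟩

-- B's decision chain is exactly first-match-or-default over the route table
lemma chain_eq_findD (endpoint : String) (he : (endpoint == "") = false) :
    classify_endpoint_to_module_alt endpoint = findD endpoint routeModuleMap.items := by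
  unfold classify_endpoint_to_module_alt
  rw [if_neg (by simp_all)]
  show _ = findD endpoint routeList
  simp only [routeList, findD_cons, findD_nil]

-- ===== VERDICT (by name: the statement is the Claim_ definition above) =====
theorem classify_endpoint_to_module_spec : Claim_equal_classify_endpoint_to_module := by
  intro endpoint _
  unfold Spec_classify_endpoint_to_module
  by_cases he : endpoint == ""
  · simp [classify_endpoint_to_module, classify_endpoint_to_module_alt, he]
  · rw [chain_eq_findD endpoint (by simp_all)]
    unfold classify_endpoint_to_module
    rw [if_neg (by simp_all)]
    have hscan : (classifyScan endpoint).1 = findD endpoint routeModuleMap.items :=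
      fold_eq_findD endpoint routeModuleMap.items (routes_excl endpoint) routes_keys_pos
    have hsw : PySem.Str.startswith endpoint endpoint = true := by
      rw [PySem.Str.startswith_eq]
      exact (PySem.Chars.startswith_iff _ _).mpr List.prefix_rfl
    rcases hg : PySem.Dict.get? routeModuleMap endpoint with _ | mod
    · exact hscan
    · -- exact match: (endpoint, mod) is the unique matching item, so findD returns mod
      show (if (mod == "") = true then (classifyScan endpoint).1 else mod) =
        findD endpoint routeModuleMap.items
      have hmem := PySem.Dict.mem_items_of_get?_eq_some (d := routeModuleMap) hg
      rcases hfind : routeModuleMap.items.find?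
          (fun pm => PySem.Str.startswith endpoint pm.1) with _ | pm
      · exact absurd hsw (by simpa using List.find?_eq_none.mp hfind (endpoint, mod) hmem)
      · have hpm : PySem.Str.startswith endpoint pm.1 = true := by
          simpa using List.find?_some hfind
        have hpmeq : pm = (endpoint, mod) :=
          match_unique (fun pm : String × String => PySem.Str.startswith endpoint pm.1)
            routeModuleMap.items (routes_excl endpoint)
            (List.mem_of_find?_eq_some hfind) hmem hpm hsw
        rw [if_neg (by simpa using routes_vals_ne_empty (endpoint, mod) hmem)]
        unfold findD
        rw [hfind, hpmeq]
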